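-- pv_equiv track=rewrite | github.com/michaeljhuman/TaxmanAlgorithm | taxman.py | tm1
-- ===== SOURCE A (Python) =====
-- def factors( x, theList):
--     fctrs=[]
--     for i in theList[::-1]:
--         if i >= x:
--             continue
--         if x % i == 0:
--             fctrs.append( i)
--     return fctrs
--
-- def tm1( theList):
--     for i in theList[::-1]:
--         fctrs=factors( i, theList)
--         if len( fctrs) == 0:
--             continue
--         if len( fctrs) == 1:
--             return i
--     return 0
-- ===== SOURCE B (Python) =====
-- def tm1(theList):
--     counts = {}
--     negs = 0
--     for v in theList:
--         counts[v] = counts.get(v, 0) + 1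
--         if v < 0:
--             negs += 1
--     for i in reversed(theList):
--         if i < 0:
--             continue              # nothing below a negative i can divide it
--         if i == 0:
--             if negs == 1:         # every negative element divides 0
--                 return 0
--             continue
--         # count list elements dividing i (with multiplicity) by enumerating
--         # the divisors of i up to sqrt(i) and looking up +/- each pair member
--         c = 0
--         d = 1
--         while d * d <= i:
--             if i % d == 0:
--                 e = i // d
--                 c += counts.get(-d, 0)
--                 if d != i:
--                     c += counts.get(d, 0)
--                 if e != d:
--                     c += counts.get(-e, 0)
--                     if e != i:
--                         c += counts.get(e, 0)
--             d += 1
--         if c == 1: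
--             return i
--     return 0
-- ===== Notes on version B (the rewrite author's own statement) =====
-- stated objective: faster
-- what changed: B never scans the list per candidate: it builds a value-to-count dictionary and a negatives tally once, then for each positive candidate i enumerates the divisors of i arithmetically up to sqrt(i) (adding the counts of +/-d and +/-(i//d) from the dictionary), answers the candidate 0 from the negatives tally, and dismisses negative candidates outright.
-- crash fix: On lists that contain 0 together with a positive element (except the shape kept inside Pre_: exactly one negative and a 0 met before any positive in the backward scan, where A returns 0), A raises ZeroDivisionError from 'x % 0'; B skips the candidate-0 special case via its tally and returns its normal scan result. — e.g. on tm1([0, 3]): A raises ZeroDivisionError, B returns 0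
import Mathlib
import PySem

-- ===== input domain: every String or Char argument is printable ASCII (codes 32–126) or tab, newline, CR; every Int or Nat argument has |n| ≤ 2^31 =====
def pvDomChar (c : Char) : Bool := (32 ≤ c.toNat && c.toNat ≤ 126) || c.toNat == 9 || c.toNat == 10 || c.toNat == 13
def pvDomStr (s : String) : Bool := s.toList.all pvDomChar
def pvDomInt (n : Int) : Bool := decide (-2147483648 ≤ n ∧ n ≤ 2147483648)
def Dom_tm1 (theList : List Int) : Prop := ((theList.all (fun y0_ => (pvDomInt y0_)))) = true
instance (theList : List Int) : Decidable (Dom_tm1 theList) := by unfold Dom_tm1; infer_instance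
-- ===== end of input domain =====

-- B replaces A's per-candidate rescan of the whole list by a value→count dictionary plus a
-- negative tally built in one pass; negative candidates are dismissed, the candidate 0 is
-- answered from the tally, and a positive candidate's divisor count is obtained by enumerating
-- the divisors of i up to sqrt(i) and looking up ±d and ±(i//d) in the dictionary (measured
-- faster in a timing run).


-- ===== PORT A =====
-- factors(x, theList); Python's 'x % i' raises ZeroDivisionError at i = 0 — those inputs are
-- excluded by Pre_tm1 (PySem.Int.mod is total, the Python is not there).
def factorsA (x : Int) (theList : List Int) : List Int :=
  ((PySem.List.slice? theList none none (-1)).getD []).foldl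
    (fun fctrs i =>
      if i ≥ x then fctrs
      else if PySem.Int.mod x i = 0 then fctrs ++ [i]
      else fctrs) []

def tm1Loop (theList : List Int) : List Int → Int
  | [] => 0
  | i :: rest =>
      let fctrs := factorsA i theList
      if fctrs.length = 0 then tm1Loop theList rest
      else if fctrs.length = 1 then i
      else tm1Loop theList rest

def tm1 (theList : List Int) : Int :=
  tm1Loop theList ((PySem.List.slice? theList none none (-1)).getD [])

-- ===== PORT B =====
-- the 'while d * d <= i' loop of Source B; Python's i // d is PySem.Int.floordiv (exact)
def altDivLoop (counts : PySem.Dict Int Int) (i : Int) (d : Int) (c : Int) : Int :=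
  if h : d * d ≤ i then
    let c' :=
      if PySem.Int.mod i d = 0 then
        let e := PySem.Int.floordiv i d
        let c1 := c + counts.getD (-d) 0
        let c2 := if d ≠ i then c1 + counts.getD d 0 else c1
        if e ≠ d then
          let c3 := c2 + counts.getD (-e) 0
          if e ≠ i then c3 + counts.getD e 0 else c3
        else c2
      else c
    altDivLoop counts i (d + 1) c'
  else c
termination_by (i + 1 - d).toNat
decreasing_by
  have hd : d ≤ i := by
    by_cases hd0 : d ≤ 0
    · have := mul_self_nonneg d; omega
    · have : d * 1 ≤ d * d := by
        apply mul_le_mul_of_nonneg_left <;> omega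
      omega
  omega

-- reversed(theList) is List.reverse (exact).
def tm1AltScan (counts : PySem.Dict Int Int) (negs : Int) : List Int → Int
  | [] => 0
  | i :: rest =>
      if i < 0 then tm1AltScan counts negs rest
      else if i = 0 then
        if negs = 1 then 0 else tm1AltScan counts negs rest
      else
        let c := altDivLoop counts i 1 0
        if c = 1 then i else tm1AltScan counts negs rest

def tm1_alt (theList : List Int) : Int :=
  let st := theList.foldl
    (fun st v => (st.1.insert v (st.1.getD v 0 + 1), if v < 0 then st.2 + 1 else st.2))
    (PySem.Dict.empty, 0)
  tm1AltScan st.1 st.2 theList.reverse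

-- ===== PRECONDITION & SPEC =====
-- Pre_tm1 is exactly where the Python A returns: otherwise the list holds 0 together with a
-- positive element and the scan reaches 'x % 0', raising ZeroDivisionError (the third disjunct is
-- the only 0-and-positive shape that returns first: a single negative and a 0 met before any
-- positive in the backward scan).
def Pre_tm1 (theList : List Int) : Prop :=
  (0 : Int) ∉ theList ∨ (∀ x ∈ theList, x ≤ 0) ∨
    ((theList.filter (fun x => decide (x < 0))).length = 1 ∧
      (0 : Int) ∈ theList.reverse.takeWhile (fun x => decide (x ≤ 0)))
instance (theList : List Int) : Decidable (Pre_tm1 theList) := by unfold Pre_tm1; infer_instance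
def pvWitness_tm1 : List Int := [2, 3, 4]

-- On lists containing 0 together with a positive element (beyond Pre_'s third disjunct) A raises
-- ZeroDivisionError from 'x % 0'; B skips the zero divisor and returns its normal scan result.
def Raises_tm1 (theList : List Int) : Prop :=
  (0 : Int) ∈ theList ∧ ¬ (∀ x ∈ theList, x ≤ 0) ∧
    ¬ ((theList.filter (fun x => decide (x < 0))).length = 1 ∧
      (0 : Int) ∈ theList.reverse.takeWhile (fun x => decide (x ≤ 0)))
instance (theList : List Int) : Decidable (Raises_tm1 theList) := by unfold Raises_tm1; infer_instance
def pvRaiseWitness_tm1 : List Int := [0, 3]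
def pvRaiseWitnessOut_tm1 : Int := 0

def Spec_tm1 (theList : List Int) (out : Int) : Prop := out = tm1_alt theList
instance (theList : List Int) (out : Int) : Decidable (Spec_tm1 theList out) := by unfold Spec_tm1; infer_instance

-- ===== CLAIM (what is proved, stated in full; the proofs are below) =====
def Claim_equal_tm1 : Prop := ∀ (theList : List Int), Dom_tm1 theList → Pre_tm1 theList → Spec_tm1 theList (tm1 theList)
def Claim_raises_tm1 : Prop := (∀ (theList : List Int), Dom_tm1 theList → Raises_tm1 theList → ¬ Pre_tm1 theList) ∧ (Dom_tm1 (pvRaiseWitness_tm1) ∧ Raises_tm1 (pvRaiseWitness_tm1) ∧ tm1_alt (pvRaiseWitness_tm1) = pvRaiseWitnessOut_tm1)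

-- ===== LEMMAS AND PROOFS =====

theorem factorsA_eq (x : Int) (L : List Int) :
    factorsA x L = L.reverse.filter (fun j => decide (j < x ∧ PySem.Int.mod x j = 0)) := by
  unfold factorsA
  rw [PySem.List.slice?_none_none_neg_one, Option.getD_some]
  have hcg := PySem.List.foldl_congr_mem (l := L.reverse) (init := ([] : List Int))
      (f := fun fctrs i =>
        if i ≥ x then fctrs
        else if PySem.Int.mod x i = 0 then fctrs ++ [i]
        else fctrs)
      (g := fun fctrs i => if (i < x ∧ PySem.Int.mod x i = 0) then fctrs ++ [i] else fctrs)
      (by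
        intro acc i _
        show (if i ≥ x then acc
              else if PySem.Int.mod x i = 0 then acc ++ [i] else acc)
            = (if (i < x ∧ PySem.Int.mod x i = 0) then acc ++ [i] else acc)
        by_cases h1 : i ≥ x
        · rw [if_pos h1, if_neg (by rintro ⟨hlt, _⟩; omega)]
        · rw [if_neg h1]
          by_cases h2 : PySem.Int.mod x i = 0
          · rw [if_pos h2, if_pos ⟨by omega, h2⟩]
          · rw [if_neg h2, if_neg (by rintro ⟨_, hm⟩; exact h2 hm)])
  rw [hcg, PySem.List.foldl_append_ite_eq_filter, List.nil_append]

theorem factorsA_length (x : Int) (L : List Int) :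
    (factorsA x L).length = L.countP (fun j => decide (j < x ∧ PySem.Int.mod x j = 0)) := by
  rw [factorsA_eq, List.filter_reverse, List.length_reverse, ← List.countP_eq_length_filter]

theorem factorsA_neg_length (L : List Int) (x : Int) (hx : x < 0) :
    (factorsA x L).length = 0 := by
  rw [factorsA_length, List.countP_eq_zero]
  intro j _
  simp only [decide_eq_true_eq]
  rintro ⟨h1, h2⟩
  rw [PySem.Int.mod_eq_zero_iff_dvd] at h2
  have hd := Int.natAbs_dvd_natAbs.mpr h2
  have hle := Nat.le_of_dvd (by omega) hd
  omega

theorem factorsA_zero_length (L : List Int) :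
    (factorsA 0 L).length = L.countP (fun x => decide (x < 0)) := by
  rw [factorsA_length]
  congr 1
  funext j
  by_cases hj : j < 0
  · have hm : PySem.Int.mod 0 j = 0 := by
      rw [PySem.Int.mod_eq_zero_iff_dvd]; exact dvd_zero j
    simp [hj, hm]
  · simp [hj]

-- the divisor set of a positive candidate i, as a finset (same predicate as factorsA)
noncomputable def Dfin (i : Int) : Finset Int :=
  (Finset.Icc (-i) i).filter (fun j => j < i ∧ PySem.Int.mod i j = 0)

-- the sqrt-loop step at which divisor j is credited
def stepOf (i j : Int) : Int :=
  if (j.natAbs : Int) * (j.natAbs : Int) ≤ i then (j.natAbs : Int) else i / (j.natAbs : Int)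

-- the sum Source B's while loop still has to add from step d on
noncomputable def Sfrom (L : List Int) (i d : Int) : Int :=
  (((Dfin i).filter (fun j => d ≤ stepOf i j)).sum (fun j => (L.count j : Int)))

theorem mem_Dfin {i j : Int} (hi : 0 < i) :
    j ∈ Dfin i ↔ j ∣ i ∧ j < i := by
  unfold Dfin
  rw [Finset.mem_filter, Finset.mem_Icc, PySem.Int.mod_eq_zero_iff_dvd]
  constructor
  · rintro ⟨_, h1, h2⟩; exact ⟨h2, h1⟩
  · rintro ⟨h2, h1⟩
    have hd := Int.natAbs_dvd_natAbs.mpr h2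
    have hle := Nat.le_of_dvd (by omega) hd
    exact ⟨by omega, h1, h2⟩

theorem Dfin_ne_zero {i j : Int} (hi : 0 < i) (hj : j ∈ Dfin i) : j ≠ 0 := by
  rcases (mem_Dfin hi).mp hj with ⟨hdvd, _⟩
  rintro rfl
  rw [zero_dvd_iff] at hdvd
  omega

theorem natAbs_div_eq {s t i : Int} (hs : 0 < s) (he : i = s * t) : i / s = t := by
  subst he; exact Int.mul_ediv_cancel_left t (by omega)

-- stepOf is ≥ 1, divides i, and has square ≤ i, for every divisor j of positive i
theorem stepOf_props {i j : Int} (hi : 0 < i) (hj : j ∈ Dfin i) :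
    1 ≤ stepOf i j ∧ stepOf i j ∣ i ∧ stepOf i j * stepOf i j ≤ i := by
  rcases (mem_Dfin hi).mp hj with ⟨hdvd, _⟩
  have hj0 : j ≠ 0 := Dfin_ne_zero hi hj
  set s : Int := (j.natAbs : Int) with hs
  have hs1 : 1 ≤ s := by
    have : j.natAbs ≠ 0 := Int.natAbs_ne_zero.mpr hj0
    omega
  have hsdvd : s ∣ i := (Int.natAbs_dvd).mpr hdvd
  obtain ⟨t, ht⟩ := hsdvd
  have ht1 : 1 ≤ t := by nlinarith
  unfold stepOf
  rw [← hs]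
  by_cases hcase : s * s ≤ i
  · rw [if_pos hcase]
    exact ⟨hs1, ⟨t, ht⟩, hcase⟩
  · rw [if_neg hcase]
    rw [natAbs_div_eq (by omega) ht]
    have hts : t < s := by nlinarith
    refine ⟨ht1, ⟨s, by linarith [ht, mul_comm s t]⟩ , by nlinarith⟩

-- characterization: at a loop step d (1 ≤ d, d*d ≤ i, i = d*e) the divisors credited are ±d, ±e
theorem stepOf_eq_iff {i d e j : Int} (hi : 0 < i) (hd1 : 1 ≤ d) (hdd : d * d ≤ i)
    (he : i = d * e) (hj : j ∈ Dfin i) :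
    stepOf i j = d ↔ (j = d ∨ j = -d ∨ j = e ∨ j = -e) := by
  have he1 : 1 ≤ e := by nlinarith
  have hj0 : j ≠ 0 := Dfin_ne_zero hi hj
  rcases (mem_Dfin hi).mp hj with ⟨hdvd, _⟩
  set s : Int := (j.natAbs : Int) with hs
  have habs : j = s ∨ j = -s := by
    rcases Int.natAbs_eq j with h | h <;> [left; right] <;> omega
  have hs1 : 1 ≤ s := by
    have : j.natAbs ≠ 0 := Int.natAbs_ne_zero.mpr hj0
    omega
  have hsdvd : s ∣ i := (Int.natAbs_dvd).mpr hdvd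
  obtain ⟨t, ht⟩ := hsdvd
  have ht1 : 1 ≤ t := by nlinarith
  constructor
  · intro hstep
    unfold stepOf at hstep
    rw [← hs] at hstep
    by_cases hcase : s * s ≤ i
    · rw [if_pos hcase] at hstep
      rcases habs with h | h <;> omega
    · rw [if_neg hcase, natAbs_div_eq (by omega) ht] at hstep
      -- t = d, so i = s * d = d * e, hence s = e
      have hse : s = e := by
        have h1 : d * s = d * e := by rw [he] at ht; nlinarith
        exact mul_left_cancel₀ (by omega) h1
      rcases habs with h | h <;> omega
  · intro hcases
    unfold stepOf
    rw [← hs]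
    have hsd : s = d ∨ s = e := by
      rcases hcases with h | h | h | h <;> omega
    rcases hsd with h | h
    · rw [h, if_pos hdd]
    · rw [h]
      by_cases hcase : e * e ≤ i
      · -- e*e ≤ i and d*d ≤ i with d*e = i force e = d
        rw [if_pos hcase]
        nlinarith
      · rw [if_neg hcase]
        exact natAbs_div_eq (by omega) (by linarith [he, mul_comm d e])

theorem d_ne_i_of_e_ne {i d e : Int} (hi : 0 < i) (hd1 : 1 ≤ d) (hdd : d * d ≤ i)
    (he : i = d * e) (hne : e ≠ d) : d ≠ i := by
  intro h
  have he1 : 1 ≤ e := by nlinarith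
  have h1 : e = 1 := by
    have h2 : d * e = d * 1 := by omega
    exact mul_left_cancel₀ (by omega) h2
  have hdd2 : d * 1 ≤ d * d := by apply mul_le_mul_of_nonneg_left <;> omega
  have h3 : d * d = d * 1 := by omega
  have h4 : d = 1 := mul_left_cancel₀ (show (d:Int) ≠ 0 by omega) h3
  omega

-- splitting off one loop step from the remaining sum
theorem Sfrom_split (L : List Int) (i d : Int) :
    Sfrom L i d
      = (((Dfin i).filter (fun j => stepOf i j = d)).sum (fun j => (L.count j : Int)))
        + Sfrom L i (d + 1) := by
  unfold Sfrom
  rw [← Finset.sum_union]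
  · congr 1
    ext j
    simp only [Finset.mem_union, Finset.mem_filter]
    constructor
    · rintro ⟨hj, hle⟩
      by_cases h : stepOf i j = d
      · exact Or.inl ⟨hj, h⟩
      · exact Or.inr ⟨hj, by omega⟩
    · rintro (⟨hj, h⟩ | ⟨hj, h⟩) <;> exact ⟨hj, by omega⟩
  · rw [Finset.disjoint_left]
    rintro j h1 h2
    rw [Finset.mem_filter] at h1 h2
    omega

theorem Sfrom_zero (L : List Int) (i d : Int) (hi : 0 < i) (hd : i < d * d) (hd1 : 1 ≤ d) :
    Sfrom L i d = 0 := by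
  unfold Sfrom
  rw [Finset.filter_eq_empty_iff.mpr, Finset.sum_empty]
  intro j hj
  obtain ⟨h1, _, h3⟩ := stepOf_props hi hj
  intro hle
  nlinarith

theorem Sfrom_skip (L : List Int) (i d : Int) (hi : 0 < i) (hnd : ¬ d ∣ i) :
    Sfrom L i d = Sfrom L i (d + 1) := by
  rw [Sfrom_split]
  have h : ((Dfin i).filter (fun j => stepOf i j = d)) = ∅ := by
    rw [Finset.filter_eq_empty_iff]
    intro j hj hstep
    obtain ⟨_, h2, _⟩ := stepOf_props hi hj
    rw [hstep] at h2
    exact hnd h2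
  rw [h, Finset.sum_empty, zero_add]

-- membership of the credited divisors
theorem neg_mem_Dfin {i d : Int} (hi : 0 < i) (_hd1 : 1 ≤ d) (hdvd : d ∣ i) :
    -d ∈ Dfin i := by
  rw [mem_Dfin hi]
  exact ⟨(Int.neg_dvd).mpr hdvd, by omega⟩

theorem pos_mem_Dfin {i d : Int} (hi : 0 < i) (hd1 : 1 ≤ d) (hdvd : d ∣ i) (hne : d ≠ i) :
    d ∈ Dfin i := by
  rw [mem_Dfin hi]
  have := Int.le_of_dvd hi hdvd
  exact ⟨hdvd, by omega⟩

-- the value of one loop step's credited sum, in each shape case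
theorem filter_step_val (L : List Int) {i d e : Int} (hi : 0 < i) (hd1 : 1 ≤ d)
    (hdd : d * d ≤ i) (he : i = d * e) :
    (((Dfin i).filter (fun j => stepOf i j = d)).sum (fun j => (L.count j : Int)))
      = (L.count (-d) : Int)
        + (if d ≠ i then (L.count d : Int) else 0)
        + (if e ≠ d then (L.count (-e) : Int) + (if e ≠ i then (L.count e : Int) else 0) else 0) := by
  have he1 : 1 ≤ e := by nlinarith
  have hddvd : d ∣ i := ⟨e, he⟩
  have hedvd : e ∣ i := ⟨d, by linarith [he, mul_comm d e]⟩
  have hdlei := Int.le_of_dvd hi hddvd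
  have helei := Int.le_of_dvd hi hedvd
  by_cases hed : e = d
  · by_cases hdi : d = i
    · -- then i = d*e = i*i, so i = d = e = 1
      have hi1 : i = 1 := by nlinarith
      have hset : ((Dfin i).filter (fun j => stepOf i j = d)) = {-d} := by
        ext j
        rw [Finset.mem_filter, Finset.mem_singleton]
        constructor
        · rintro ⟨hj, hstep⟩
          have hm := (stepOf_eq_iff hi hd1 hdd he hj).mp hstep
          have hlt := ((mem_Dfin hi).mp hj).2
          rcases hm with h | h | h | h <;> omega
        · intro h
          have hmem : j ∈ Dfin i := h ▸ neg_mem_Dfin hi hd1 hddvd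
          exact ⟨hmem, (stepOf_eq_iff hi hd1 hdd he hmem).mpr (by omega)⟩
      rw [hset, Finset.sum_singleton, if_neg (by omega), if_neg (by omega)]
      ring
    · -- e = d ≠ i : credited divisors are -d and d
      have hset : ((Dfin i).filter (fun j => stepOf i j = d)) = {-d, d} := by
        ext j
        rw [Finset.mem_filter, Finset.mem_insert, Finset.mem_singleton]
        constructor
        · rintro ⟨hj, hstep⟩
          have hm := (stepOf_eq_iff hi hd1 hdd he hj).mp hstep
          rcases hm with h | h | h | h <;> omega
        · intro h
          have hmem : j ∈ Dfin i := by
            rcases h with h | h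
            · exact h ▸ neg_mem_Dfin hi hd1 hddvd
            · exact h ▸ pos_mem_Dfin hi hd1 hddvd hdi
          exact ⟨hmem, (stepOf_eq_iff hi hd1 hdd he hmem).mpr (by omega)⟩
      rw [hset, Finset.sum_pair (by omega), if_pos hdi, if_neg (by omega)]
      ring
  · have hdi : d ≠ i := d_ne_i_of_e_ne hi hd1 hdd he hed
    by_cases hei : e = i
    · -- then d = 1 and i ≥ 2 : credited divisors are -1, 1, -i
      have hd1' : d = 1 := by
        have h2 : d * e = 1 * e := by rw [← he, hei]; ring
        exact mul_right_cancel₀ (by omega) h2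
      have hi2 : 2 ≤ i := by omega
      have hset : ((Dfin i).filter (fun j => stepOf i j = d)) = {-d, d, -e} := by
        ext j
        rw [Finset.mem_filter, Finset.mem_insert, Finset.mem_insert, Finset.mem_singleton]
        constructor
        · rintro ⟨hj, hstep⟩
          have hm := (stepOf_eq_iff hi hd1 hdd he hj).mp hstep
          have hlt := ((mem_Dfin hi).mp hj).2
          rcases hm with h | h | h | h <;> omega
        · intro h
          have hmem : j ∈ Dfin i := by
            rcases h with h | h | h
            · exact h ▸ neg_mem_Dfin hi hd1 hddvd
            · exact h ▸ pos_mem_Dfin hi hd1 hddvd hdi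
            · exact h ▸ neg_mem_Dfin hi (by omega) hedvd
          exact ⟨hmem, (stepOf_eq_iff hi hd1 hdd he hmem).mpr (by omega)⟩
      rw [hset, Finset.sum_insert (by rw [Finset.mem_insert, Finset.mem_singleton]; omega),
        Finset.sum_pair (by omega), if_pos hdi, if_pos hed, if_neg (by omega)]
      ring
    · -- generic case: credited divisors are -d, d, -e, e
      have hset : ((Dfin i).filter (fun j => stepOf i j = d)) = {-d, d, -e, e} := by
        ext j
        rw [Finset.mem_filter, Finset.mem_insert, Finset.mem_insert, Finset.mem_insert,
          Finset.mem_singleton]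
        constructor
        · rintro ⟨hj, hstep⟩
          have hm := (stepOf_eq_iff hi hd1 hdd he hj).mp hstep
          rcases hm with h | h | h | h <;> omega
        · intro h
          have hmem : j ∈ Dfin i := by
            rcases h with h | h | h | h
            · exact h ▸ neg_mem_Dfin hi hd1 hddvd
            · exact h ▸ pos_mem_Dfin hi hd1 hddvd hdi
            · exact h ▸ neg_mem_Dfin hi (by omega) hedvd
            · exact h ▸ pos_mem_Dfin hi (by omega) hedvd hei
          exact ⟨hmem, (stepOf_eq_iff hi hd1 hdd he hmem).mpr (by omega)⟩
      rw [hset,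
        Finset.sum_insert (by
          rw [Finset.mem_insert, Finset.mem_insert, Finset.mem_singleton]; omega),
        Finset.sum_insert (by rw [Finset.mem_insert, Finset.mem_singleton]; omega),
        Finset.sum_pair (by omega), if_pos hdi, if_pos hed, if_pos hei]
      ring

-- the while loop of Source B computes the remaining credited sum
theorem altDivLoop_inv (L : List Int) (i : Int) (hi : 0 < i) :
    ∀ n d c, 1 ≤ d → (i + 1 - d).toNat ≤ n →
      altDivLoop (PySem.Dict.counter L) i d c = c + Sfrom L i d := by
  intro n
  induction n with
  | zero =>
    intro d c hd1 hn
    have hdi : i < d := by omega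
    rw [altDivLoop]
    rw [dif_neg (by nlinarith)]
    rw [Sfrom_zero L i d hi (by nlinarith) hd1]
    omega
  | succ n ih =>
    intro d c hd1 hn
    by_cases hguard : d * d ≤ i
    · have hdi : d ≤ i := by nlinarith
      rw [altDivLoop, dif_pos hguard]
      rw [ih (d + 1) _ (by omega) (by omega)]
      by_cases hdvd : d ∣ i
      · obtain ⟨e, he⟩ := hdvd
        have he1 : 1 ≤ e := by nlinarith
        have hmod : PySem.Int.mod i d = 0 := by
          rw [PySem.Int.mod_eq_zero_iff_dvd]; exact ⟨e, he⟩
        have hfd : PySem.Int.floordiv i d = e := by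
          rw [PySem.Int.floordiv_eq_ediv_of_pos (by omega)]
          exact natAbs_div_eq (by omega) he
        rw [Sfrom_split L i d, filter_step_val L hi hd1 hguard he]
        simp only [hmod, if_true, hfd, PySem.Dict.getD_counter]
        split_ifs <;> ring
      · have hmod : PySem.Int.mod i d ≠ 0 := by
          rw [Ne, PySem.Int.mod_eq_zero_iff_dvd]; exact hdvd
        rw [if_neg hmod, Sfrom_skip L i d hi hdvd]
    · rw [altDivLoop, dif_neg hguard]
      rw [Sfrom_zero L i d hi (by omega) hd1]
      omega

theorem sum_count_eq_countP (s : Finset Int) (L : List Int) :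
    (s.sum (fun j => (L.count j : Int))) = (L.countP (fun x => decide (x ∈ s)) : Int) := by
  induction L with
  | nil => simp
  | cons x t ih =>
    have hsplit : (fun j => ((((x :: t).count j : Nat)) : Int))
        = fun j => ((t.count j : Nat) : Int) + (if j = x then 1 else 0) := by
      funext j
      rw [List.count_cons]
      by_cases h : j = x
      · simp [h]
      · simp [h, Ne.symm h]
    rw [hsplit, Finset.sum_add_distrib, ih, Finset.sum_ite_eq' s x (fun _ => (1 : Int)),
      List.countP_cons]
    by_cases h : x ∈ s <;> simp [h]

-- Source B's divisor enumeration counts exactly what A's factors() collects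
theorem alt_count_eq (L : List Int) (i : Int) (hi : 0 < i) :
    altDivLoop (PySem.Dict.counter L) i 1 0 = ((factorsA i L).length : Int) := by
  rw [altDivLoop_inv L i hi ((i + 1 - 1).toNat) 1 0 (by omega) (by omega), zero_add]
  unfold Sfrom
  have hfull : ((Dfin i).filter (fun j => 1 ≤ stepOf i j)) = Dfin i := by
    rw [Finset.filter_eq_self]
    intro j hj
    exact (stepOf_props hi hj).1
  rw [hfull, sum_count_eq_countP, factorsA_length]
  congr 2
  funext j
  by_cases h : j ∈ Dfin i
  · simp [h, ((mem_Dfin hi).mp h).2,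
      (PySem.Int.mod_eq_zero_iff_dvd i j).mpr ((mem_Dfin hi).mp h).1]
  · have : ¬ (j < i ∧ PySem.Int.mod i j = 0) := by
      intro ⟨h1, h2⟩
      exact h ((mem_Dfin hi).mpr ⟨(PySem.Int.mod_eq_zero_iff_dvd i j).mp h2, h1⟩)
    simp [h, this]

theorem loop_eq (L : List Int) (rl : List Int) :
    tm1Loop L rl
      = tm1AltScan (PySem.Dict.counter L) ((L.countP (fun x => decide (x < 0)) : Int)) rl := by
  induction rl with
  | nil => rfl
  | cons i rest ih =>
    simp only [tm1Loop, tm1AltScan]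
    by_cases h1 : i < 0
    · simp [factorsA_neg_length L i h1, h1, ih]
    · by_cases h2 : i = 0
      · subst h2
        by_cases hn1 : L.countP (fun x => decide (x < 0)) = 1
        · simp [factorsA_zero_length, hn1]
        · have hcast : ((L.countP (fun x => decide (x < 0)) : Nat) : Int) ≠ 1 := by
            exact_mod_cast hn1
          by_cases hn0 : L.countP (fun x => decide (x < 0)) = 0 <;>
            simp [factorsA_zero_length, hn0, hn1, hcast, ih]
      · have hi : 0 < i := by omega
        have hc := alt_count_eq L i hi
        by_cases hl : (factorsA i L).length = 1
        · simp [h1, h2, hc, hl]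
        · have hcast : ((factorsA i L).length : Int) ≠ 1 := by exact_mod_cast hl
          by_cases h0 : (factorsA i L).length = 0 <;>
            simp [h1, h2, hc, h0, hl, hcast, ih]

theorem tm1_eq_alt (L : List Int) : tm1 L = tm1_alt L := by
  simp only [tm1, tm1_alt]
  rw [PySem.List.slice?_none_none_neg_one, Option.getD_some]
  simp only [PySem.List.foldl_prod_mk
    (f := fun (d : PySem.Dict Int Int) (v : Int) => d.insert v (d.getD v 0 + 1))
    (g := fun (n v : Int) => if v < 0 then n + 1 else n)]
  rw [PySem.Dict.foldl_insert_getD_add_one_eq_counter,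
    PySem.List.foldl_ite_add_one, zero_add]
  exact loop_eq L L.reverse

-- ===== VERDICT (by name: the statement is the Claim_ definition above) =====
theorem tm1_spec : Claim_equal_tm1 := by
  intro L _ _
  unfold Spec_tm1
  exact tm1_eq_alt L

theorem tm1_raises : Claim_raises_tm1 := by
  unfold Claim_raises_tm1
  constructor
  · intro L _ hr hp
    rcases hp with h | h | h
    · exact h hr.1
    · exact hr.2.1 h
    · exact hr.2.2 h
  · exact ⟨by decide, by decide, by rw [← tm1_eq_alt]; decide⟩

-- self-check: the raise witness itself lies outside Pre_tm1
theorem tm1_raises_ok : Claim_raises_tm1 ∧ ¬ Pre_tm1 pvRaiseWitness_tm1 :=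
  ⟨tm1_raises, by decide⟩
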